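-- pv_equiv track=rewrite | github.com/GreatLim/Transform_QR | transform.py | find_four_points
-- ===== SOURCE A (Python) =====
-- def find_four_points(cnt):
--     start_point = cnt[0][0]
--     points = [start_point, start_point, start_point, start_point]
--     start_num1 = start_point[0] + start_point[1]
--     start_num2 = start_point[1] - start_point[0]
--     nums = [start_num1, start_num2, start_num2, start_num1]
--
--     for point in cnt:
--         num1 = point[0][0] + point[0][1]
--         num2 = point[0][1] - point[0][0]
--         if num1 < nums[0]:
--             nums[0] = num1
--             points[0] = point[0]
--         if num1 > nums[3]:
--             nums[3] = num1
--             points[3] = point[0]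
--         if num2 < nums[1]:
--             nums[1] = num2
--             points[1] = point[0]
--         if num2 > nums[2]:
--             nums[2] = num2
--             points[2] = point[0]
--
--     return points
-- ===== SOURCE B (Python) =====
-- def find_four_points(cnt):
--     s = lambda q: q[0] + q[1]
--     d = lambda q: q[1] - q[0]
--     heads = [point[0] for point in cnt]
--     return [sorted(heads, key=s)[0],
--             sorted(heads, key=d)[0],
--             sorted(heads, key=d, reverse=True)[0],
--             sorted(heads, key=s, reverse=True)[0]]
-- ===== Notes on version B (the rewrite author's own statement) =====
-- stated objective: alternative
-- what changed: Replaces A's single fused scan maintaining an 8-cell mutable points/nums state by sort-then-pick: stable-sort the point heads by each of the two keys, ascending and descending, and take the first element of each sorted list (stability gives A's keep-first tie-breaking).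
import Mathlib
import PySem

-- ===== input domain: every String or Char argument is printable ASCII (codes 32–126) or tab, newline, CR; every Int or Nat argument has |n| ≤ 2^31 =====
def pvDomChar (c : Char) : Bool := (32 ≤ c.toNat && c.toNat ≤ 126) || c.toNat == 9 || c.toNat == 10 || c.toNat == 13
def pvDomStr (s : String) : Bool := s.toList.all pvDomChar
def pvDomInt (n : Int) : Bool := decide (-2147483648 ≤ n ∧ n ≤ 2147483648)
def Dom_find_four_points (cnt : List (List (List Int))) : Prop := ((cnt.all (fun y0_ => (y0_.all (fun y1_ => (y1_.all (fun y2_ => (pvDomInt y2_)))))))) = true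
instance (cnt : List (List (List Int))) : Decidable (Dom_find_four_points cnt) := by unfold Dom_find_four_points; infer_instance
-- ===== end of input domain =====

-- B replaces A's single fused scan over an 8-cell mutable points/nums state by
-- sort-then-pick: stable-sort the point heads by each key (ascending and
-- descending) and take the first element of each (objective: alternative).

-- ===== PORT A =====
def find_four_points (cnt : List (List (List Int))) : List (List Int) :=
  let start_point := PySem.List.pyGetD (PySem.List.pyGetD cnt 0 []) 0 []
  let start_num1 := PySem.List.pyGetD start_point 0 0 + PySem.List.pyGetD start_point 1 0
  let start_num2 := PySem.List.pyGetD start_point 1 0 - PySem.List.pyGetD start_point 0 0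
  -- points/nums lists kept as a tuple state, mutated cell by cell as in A
  let st := cnt.foldl
    (fun (s : (List Int × List Int × List Int × List Int) × (Int × Int × Int × Int)) point =>
      let q := PySem.List.pyGetD point 0 []
      let num1 := PySem.List.pyGetD q 0 0 + PySem.List.pyGetD q 1 0
      let num2 := PySem.List.pyGetD q 1 0 - PySem.List.pyGetD q 0 0
      let ps := s.1; let ns := s.2
      let a := if num1 < ns.1 then (num1, q) else (ns.1, ps.1)
      let d := if ns.2.2.2 < num1 then (num1, q) else (ns.2.2.2, ps.2.2.2)
      let b := if num2 < ns.2.1 then (num2, q) else (ns.2.1, ps.2.1)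
      let c := if ns.2.2.1 < num2 then (num2, q) else (ns.2.2.1, ps.2.2.1)
      ((a.2, b.2, c.2, d.2), (a.1, b.1, c.1, d.1)))
    ((start_point, start_point, start_point, start_point),
     (start_num1, start_num2, start_num2, start_num1))
  [st.1.1, st.1.2.1, st.1.2.2.1, st.1.2.2.2]

-- ===== PORT B =====
-- keys s and d of Source B
def pvKeyS (q : List Int) : Int := PySem.List.pyGetD q 0 0 + PySem.List.pyGetD q 1 0
def pvKeyD (q : List Int) : Int := PySem.List.pyGetD q 1 0 - PySem.List.pyGetD q 0 0

def find_four_points_alt (cnt : List (List (List Int))) : List (List Int) :=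
  let heads := cnt.map (fun point => PySem.List.pyGetD point 0 [])
  [PySem.List.pyGetD (PySem.List.sorted heads pvKeyS false) 0 [],
   PySem.List.pyGetD (PySem.List.sorted heads pvKeyD false) 0 [],
   PySem.List.pyGetD (PySem.List.sorted heads pvKeyD true) 0 [],
   PySem.List.pyGetD (PySem.List.sorted heads pvKeyS true) 0 []]

-- ===== PRECONDITION & SPEC =====
-- A raises IndexError on empty cnt, on an empty point, or on a point head with
-- fewer than two coordinates; Pre_ excludes exactly those inputs.
def Pre_find_four_points (cnt : List (List (List Int))) : Prop :=
  cnt ≠ [] ∧ ∀ p ∈ cnt, p ≠ [] ∧ 2 ≤ (p.headD []).length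
instance (cnt : List (List (List Int))) : Decidable (Pre_find_four_points cnt) := by
  unfold Pre_find_four_points; infer_instance
def pvWitness_find_four_points : List (List (List Int)) := [[[0, 1]], [[3, 2]]]
def Spec_find_four_points (cnt : List (List (List Int))) (out : List (List Int)) : Prop := out = find_four_points_alt cnt
instance (cnt : List (List (List Int))) (out : List (List Int)) : Decidable (Spec_find_four_points cnt out) := by unfold Spec_find_four_points; infer_instance

-- ===== CLAIM (what is proved, stated in full; the proofs are below) =====
def Claim_equal_find_four_points : Prop := ∀ (cnt : List (List (List Int))), Dom_find_four_points cnt → Pre_find_four_points cnt → Spec_find_four_points cnt (find_four_points cnt)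

-- ===== LEMMAS AND PROOFS =====

-- first-argmin / first-argmax folds (acc-first argument order, as List.foldl applies them)
def pvAMin (f : List Int → Int) (m x : List Int) : List Int := if f x < f m then x else m
def pvAMax (f : List Int → Int) (m x : List Int) : List Int := if f m < f x then x else m

-- head of insertBy on a nonempty list: the new element wins iff 'before' holds
theorem pvInsertBy_head {α : Type} (bef : α → α → Bool) (x a : α) (r : List α) :
    ∃ r', PySem.List.insertBy bef x (a :: r) = (if bef x a then x else a) :: r' := by
  by_cases h : bef x a <;> simp [PySem.List.insertBy, h]

-- head of a foldl of insertBy over a nonempty accumulator = a keep-first extremum fold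
theorem pvFoldl_insertBy_head {α : Type} (bef : α → α → Bool) (xs : List α)
    (a : α) (r : List α) :
    ∃ r', xs.foldl (fun acc x => PySem.List.insertBy bef x acc) (a :: r)
        = (xs.foldl (fun m x => if bef x m then x else m) a) :: r' := by
  induction xs generalizing a r with
  | nil => exact ⟨r, rfl⟩
  | cons x t ih =>
      obtain ⟨r', hr'⟩ := pvInsertBy_head bef x a r
      simpa [hr'] using ih (if bef x a then x else a) r'

-- head of Python's stable sort (ascending) = the first argmin fold
theorem pvSorted_head (key : List Int → Int) (x : List Int) (t : List (List Int)) :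
    ∃ r', PySem.List.sorted (x :: t) key false = (t.foldl (pvAMin key) x) :: r' := by
  rw [PySem.List.sorted_eq_foldl_insertBy]
  simp only [List.foldl, PySem.List.insertBy]
  obtain ⟨r', hr'⟩ := pvFoldl_insertBy_head (fun a b => decide (key a < key b)) t x []
  refine ⟨r', hr'.trans ?_⟩
  have hf : (fun (m y : List Int) => if (fun a b => decide (key a < key b)) y m then y else m)
      = pvAMin key := by funext m y; simp [pvAMin]
  rw [hf]

-- head of Python's stable sort (reverse=True) = the first argmax fold
theorem pvSortedRev_head (key : List Int → Int) (x : List Int) (t : List (List Int)) :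
    ∃ r', PySem.List.sorted (x :: t) key true = (t.foldl (pvAMax key) x) :: r' := by
  rw [PySem.List.sorted_rev_eq_foldl_insertBy]
  simp only [List.foldl, PySem.List.insertBy]
  obtain ⟨r', hr'⟩ := pvFoldl_insertBy_head (fun a b => decide (key b < key a)) t x []
  refine ⟨r', hr'.trans ?_⟩
  have hf : (fun (m y : List Int) => if (fun a b => decide (key b < key a)) y m then y else m)
      = pvAMax key := by funext m y; simp [pvAMax]
  rw [hf]

-- A's combined 8-cell fold splits into four independent argmin/argmax folds
theorem pvFold_split (l : List (List (List Int))) (p0 p1 p2 p3 : List Int) :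
    l.foldl
      (fun (s : (List Int × List Int × List Int × List Int) × (Int × Int × Int × Int)) point =>
        let q := PySem.List.pyGetD point 0 []
        let num1 := PySem.List.pyGetD q 0 0 + PySem.List.pyGetD q 1 0
        let num2 := PySem.List.pyGetD q 1 0 - PySem.List.pyGetD q 0 0
        let ps := s.1; let ns := s.2
        let a := if num1 < ns.1 then (num1, q) else (ns.1, ps.1)
        let d := if ns.2.2.2 < num1 then (num1, q) else (ns.2.2.2, ps.2.2.2)
        let b := if num2 < ns.2.1 then (num2, q) else (ns.2.1, ps.2.1)
        let c := if ns.2.2.1 < num2 then (num2, q) else (ns.2.2.1, ps.2.2.1)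
        ((a.2, b.2, c.2, d.2), (a.1, b.1, c.1, d.1)))
      ((p0, p1, p2, p3),
       (PySem.List.pyGetD p0 0 0 + PySem.List.pyGetD p0 1 0,
        PySem.List.pyGetD p1 1 0 - PySem.List.pyGetD p1 0 0,
        PySem.List.pyGetD p2 1 0 - PySem.List.pyGetD p2 0 0,
        PySem.List.pyGetD p3 0 0 + PySem.List.pyGetD p3 1 0))
    = (((l.map (fun point => PySem.List.pyGetD point 0 [])).foldl (pvAMin pvKeyS) p0,
        (l.map (fun point => PySem.List.pyGetD point 0 [])).foldl (pvAMin pvKeyD) p1,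
        (l.map (fun point => PySem.List.pyGetD point 0 [])).foldl (pvAMax pvKeyD) p2,
        (l.map (fun point => PySem.List.pyGetD point 0 [])).foldl (pvAMax pvKeyS) p3),
       (pvKeyS ((l.map (fun point => PySem.List.pyGetD point 0 [])).foldl (pvAMin pvKeyS) p0),
        pvKeyD ((l.map (fun point => PySem.List.pyGetD point 0 [])).foldl (pvAMin pvKeyD) p1),
        pvKeyD ((l.map (fun point => PySem.List.pyGetD point 0 [])).foldl (pvAMax pvKeyD) p2),
        pvKeyS ((l.map (fun point => PySem.List.pyGetD point 0 [])).foldl (pvAMax pvKeyS) p3))) := by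
  induction l generalizing p0 p1 p2 p3 with
  | nil => rfl
  | cons point t ih =>
      simp only [List.foldl, List.map]
      set q := PySem.List.pyGetD point 0 [] with hq
      simp only [pvAMin, pvAMax, pvKeyS, pvKeyD] at *
      by_cases h1 : PySem.List.pyGetD q 0 0 + PySem.List.pyGetD q 1 0 < PySem.List.pyGetD p0 0 0 + PySem.List.pyGetD p0 1 0 <;>
      by_cases h2 : PySem.List.pyGetD q 1 0 - PySem.List.pyGetD q 0 0 < PySem.List.pyGetD p1 1 0 - PySem.List.pyGetD p1 0 0 <;>
      by_cases h3 : PySem.List.pyGetD p2 1 0 - PySem.List.pyGetD p2 0 0 < PySem.List.pyGetD q 1 0 - PySem.List.pyGetD q 0 0 <;>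
      by_cases h4 : PySem.List.pyGetD p3 0 0 + PySem.List.pyGetD p3 1 0 < PySem.List.pyGetD q 0 0 + PySem.List.pyGetD q 1 0 <;>
      simp [h1, h2, h3, h4, ih]

-- ===== VERDICT (by name: the statement is the Claim_ definition above) =====
theorem find_four_points_spec : Claim_equal_find_four_points := by
  intro cnt _ hpre
  obtain ⟨hne, -⟩ := hpre
  obtain ⟨c, t, rfl⟩ : ∃ c t, cnt = c :: t := by
    cases cnt with
    | nil => exact absurd rfl hne
    | cons c t => exact ⟨c, t, rfl⟩
  have hsp : PySem.List.pyGetD (PySem.List.pyGetD (c :: t) 0 []) 0 []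
      = PySem.List.pyGetD c 0 [] := by
    simp [PySem.List.pyGetD, PySem.List.pyGet?, PySem.List.pyIdx?]
  unfold Spec_find_four_points find_four_points find_four_points_alt
  simp only [hsp]
  rw [pvFold_split]
  obtain ⟨r0, h0⟩ := pvSorted_head pvKeyS (PySem.List.pyGetD c 0 []) (t.map (fun point => PySem.List.pyGetD point 0 []))
  obtain ⟨r1, h1⟩ := pvSorted_head pvKeyD (PySem.List.pyGetD c 0 []) (t.map (fun point => PySem.List.pyGetD point 0 []))
  obtain ⟨r2, h2⟩ := pvSortedRev_head pvKeyD (PySem.List.pyGetD c 0 []) (t.map (fun point => PySem.List.pyGetD point 0 []))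
  obtain ⟨r3, h3⟩ := pvSortedRev_head pvKeyS (PySem.List.pyGetD c 0 []) (t.map (fun point => PySem.List.pyGetD point 0 []))
  have hget : ∀ (a : List Int) (l : List (List Int)), PySem.List.pyGetD (a :: l) 0 [] = a := by
    intro a l; simp [PySem.List.pyGetD, PySem.List.pyGet?, PySem.List.pyIdx?]
  simp only [List.map] at h0 h1 h2 h3 ⊢
  rw [h0, h1, h2, h3]
  simp only [hget, List.foldl]
  simp [pvAMin, pvAMax]
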